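-- pv_equiv track=rewrite | github.com/heytherevibin/Project-Arc | backend/src/reporting/generators/report_builder.py | _build_remediation
-- ===== SOURCE A (Python) =====
-- from typing import Any
--
-- def _build_remediation(vulns: list[dict[str, Any]]) -> list[dict[str, Any]]:
--     """Generate remediation recommendations from vulnerabilities."""
--     remediation: list[dict[str, Any]] = []
--     seen_templates: set[str] = set()
--
--     for vuln in vulns:
--         template = vuln.get("template_id", "")
--         if template in seen_templates:
--             continue
--         seen_templates.add(template)
--
--         severity = vuln.get("severity", "info")
--         priority_map = {"critical": "P1", "high": "P2", "medium": "P3", "low": "P4"}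
--
--         remediation.append({
--             "vulnerability": vuln.get("name", template),
--             "severity": severity,
--             "priority": priority_map.get(severity, "P5"),
--             "affected": vuln.get("matched_at", ""),
--             "recommendation": f"Remediate {vuln.get('name', template)} - {severity} severity",
--             "cve": vuln.get("cve_id"),
--         })
--
--     return remediation
-- ===== SOURCE B (Python) =====
-- _PRIORITY_MAP = {"critical": "P1", "high": "P2", "medium": "P3", "low": "P4"}
--
--
-- def _record(vuln):
--     template = vuln.get("template_id", "")
--     name = vuln.get("name", template)
--     severity = vuln.get("severity", "info")
--     return {
--         "vulnerability": name,
--         "severity": severity,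
--         "priority": _PRIORITY_MAP.get(severity, "P5"),
--         "affected": vuln.get("matched_at", ""),
--         "recommendation": f"Remediate {name} - {severity} severity",
--         "cve": vuln.get("cve_id"),
--     }
--
--
-- def _build_remediation(vulns):
--     # Filter-sweep dedup: emit the first pending vuln's record, then drop every
--     # later vuln sharing its template_id; no seen-set is kept at all.
--     remediation = []
--     pending = list(vulns)
--     while pending:
--         head = pending[0]
--         t = head.get("template_id", "")
--         remediation.append(_record(head))
--         pending = [v for v in pending[1:] if v.get("template_id", "") != t]
--     return remediation
-- ===== Notes on version B (the rewrite author's own statement) =====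
-- stated objective: alternative
-- what changed: Replaces A's single pass with a seen-set by a filter-sweep with no seen structure at all: repeatedly emit the first pending vuln's record and filter every later vuln with the same template_id out of the pending list (correct because removing later duplicates of an emitted template is exactly what the seen-set skip achieves, and first occurrences are processed in order either way).
import Mathlib
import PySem

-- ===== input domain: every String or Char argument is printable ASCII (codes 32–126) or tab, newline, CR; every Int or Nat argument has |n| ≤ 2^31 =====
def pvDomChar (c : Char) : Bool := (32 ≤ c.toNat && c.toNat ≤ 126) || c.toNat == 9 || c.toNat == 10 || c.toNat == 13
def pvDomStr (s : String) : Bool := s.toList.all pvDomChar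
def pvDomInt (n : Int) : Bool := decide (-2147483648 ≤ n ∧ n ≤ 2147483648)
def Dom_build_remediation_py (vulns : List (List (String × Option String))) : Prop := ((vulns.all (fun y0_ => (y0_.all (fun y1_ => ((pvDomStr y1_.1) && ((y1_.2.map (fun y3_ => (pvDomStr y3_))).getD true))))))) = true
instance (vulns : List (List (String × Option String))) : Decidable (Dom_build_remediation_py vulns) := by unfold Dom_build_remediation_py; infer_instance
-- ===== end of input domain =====

-- B replaces A's seen-set single pass by a filter-sweep: emit the first pending record, then drop all later vulns with the same template_id (alternative decomposition, no seen structure).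

-- f-string rendering of a str-or-None value: None prints as "None", a str prints as itself (exact on this domain).
def pvFStr (o : Option String) : String := o.getD "None"

-- ===== PORT A =====
-- A's dicts have Option String values, so 'vuln.get(k, "")' defaults to 'some ""' and
-- priority_map is keyed by Option String (Python compares the possibly-None severity against its str keys; None matches nothing, exactly as 'some'-tagged keys do).
def build_remediation_py (vulns : List (List (String × Option String))) : List (List (String × Option String)) :=
  (vulns.foldl
    (fun (st : List (List (String × Option String)) × PySem.Set (Option String)) vuln =>
      let d := PySem.Dict.mk vuln
      let template := d.getD "template_id" (some "")
      if PySem.Set.contains st.2 template then st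
      else
        let seen := PySem.Set.add st.2 template
        let severity := d.getD "severity" (some "info")
        let priority_map : PySem.Dict (Option String) String :=
          PySem.Dict.ofList [(some "critical", "P1"), (some "high", "P2"), (some "medium", "P3"), (some "low", "P4")]
        let rec_ : List (String × Option String) :=
          [("vulnerability", d.getD "name" template),
           ("severity", severity),
           ("priority", some (priority_map.getD severity "P5")),
           ("affected", d.getD "matched_at" (some "")),
           ("recommendation", some ("Remediate " ++ pvFStr (d.getD "name" template) ++ " - " ++ pvFStr severity ++ " severity")),
           ("cve", (d.get? "cve_id").getD none)]
        (st.1 ++ [rec_], seen))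
    ([], [])).1

-- ===== PORT B =====
def pvPriorityMap : PySem.Dict (Option String) String :=
  PySem.Dict.ofList [(some "critical", "P1"), (some "high", "P2"), (some "medium", "P3"), (some "low", "P4")]

def pvRecord (vuln : List (String × Option String)) : List (String × Option String) :=
  let d := PySem.Dict.mk vuln
  let template := d.getD "template_id" (some "")
  let name := d.getD "name" template
  let severity := d.getD "severity" (some "info")
  [("vulnerability", name),
   ("severity", severity),
   ("priority", some (pvPriorityMap.getD severity "P5")),
   ("affected", d.getD "matched_at" (some "")),
   ("recommendation", some ("Remediate " ++ pvFStr name ++ " - " ++ pvFStr severity ++ " severity")),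
   ("cve", (d.get? "cve_id").getD none)]

def pvTid (vuln : List (String × Option String)) : Option String :=
  (PySem.Dict.mk vuln).getD "template_id" (some "")

-- the while loop of Source B: pending shrinks by at least the head each round
def pvSweep (remediation : List (List (String × Option String))) (pending : List (List (String × Option String))) : List (List (String × Option String)) :=
  match pending with
  | [] => remediation
  | head :: rest =>
      pvSweep (remediation ++ [pvRecord head]) (rest.filter (fun v => !(pvTid v == pvTid head)))
termination_by pending.length
decreasing_by
  simp only [List.length_cons]
  refine Nat.lt_succ_of_le ?_
  have h1 : (List.filter (fun x => !(pvTid x.1 == pvTid head)) rest.attach).length ≤ rest.attach.length :=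
    List.length_filter_le _ _
  simpa using h1

def build_remediation_py_alt (vulns : List (List (String × Option String))) : List (List (String × Option String)) :=
  pvSweep [] vulns

-- ===== PRECONDITION & SPEC =====
def Spec_build_remediation_py (vulns : List (List (String × Option String))) (out : List (List (String × Option String))) : Prop := out = build_remediation_py_alt vulns
instance (vulns : List (List (String × Option String))) (out : List (List (String × Option String))) : Decidable (Spec_build_remediation_py vulns out) := by unfold Spec_build_remediation_py; infer_instance

-- ===== CLAIM (what is proved, stated in full; the proofs are below) =====
def Claim_equal_build_remediation_py : Prop := ∀ (vulns : List (List (String × Option String))), Dom_build_remediation_py vulns → Spec_build_remediation_py vulns (build_remediation_py vulns)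

-- ===== LEMMAS AND PROOFS =====

theorem pvSweep_nil (acc : List (List (String × Option String))) : pvSweep acc [] = acc := by
  rw [pvSweep.eq_def]

theorem pvSweep_cons (acc : List (List (String × Option String)))
    (head : List (String × Option String)) (rest : List (List (String × Option String))) :
    pvSweep acc (head :: rest)
      = pvSweep (acc ++ [pvRecord head]) (rest.filter (fun v => !(pvTid v == pvTid head))) := by
  rw [pvSweep.eq_def]

-- Loop invariant: A's fold from (acc, seen) equals B's sweep over the vulns whose template_id is not in seen
-- (the step function here is A's loop body with its lets zeta-reduced; it is definitionally A's).
theorem pv_invariant (vulns : List (List (String × Option String)))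
    (acc : List (List (String × Option String))) (seen : PySem.Set (Option String)) :
    (vulns.foldl
      (fun (st : List (List (String × Option String)) × PySem.Set (Option String)) vuln =>
        if PySem.Set.contains st.2 (pvTid vuln) then st
        else (st.1 ++ [pvRecord vuln], PySem.Set.add st.2 (pvTid vuln))) (acc, seen)).1
    = pvSweep acc (vulns.filter (fun v => !(PySem.Set.contains seen (pvTid v)))) := by
  induction vulns generalizing acc seen with
  | nil => simp [pvSweep_nil]
  | cons head rest ih =>
    simp only [List.foldl_cons, List.filter_cons]
    by_cases hc : PySem.Set.contains seen (pvTid head) = true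
    · rw [hc]
      simp only [Bool.not_true, reduceIte]
      exact ih acc seen
    · simp only [Bool.not_eq_true] at hc
      rw [hc]
      simp only [Bool.not_false, reduceIte]
      rw [pvSweep_cons, ih]
      congr 1
      rw [List.filter_filter]
      refine List.filter_congr ?_
      intro v _
      have hm : pvTid head ∉ seen := by
        intro h
        have hct := (PySem.Set.contains_iff seen (pvTid head)).mpr h
        rw [hc] at hct
        exact Bool.false_ne_true hct
      rw [PySem.Set.add_of_not_mem hm]
      by_cases hv : pvTid v = pvTid head
      · simp [hv]
      · simp [hv]

-- ===== VERDICT (by name: the statement is the Claim_ definition above) =====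
theorem build_remediation_py_spec : Claim_equal_build_remediation_py := by
  intro vulns _
  unfold Spec_build_remediation_py build_remediation_py build_remediation_py_alt
  have := pv_invariant vulns [] []
  simpa using this
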